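-- pv_equiv track=rewrite | github.com/HyeonTae/MultiFix | util/helpers.py | _truncate_fix
-- ===== SOURCE A (Python) =====
-- def _truncate_fix(fix):
--     result = ''
--
--     for token in fix.split():
--         if token == '_eos_':
--             break
--         else:
--             result += token + ' '
--
--     return result.strip()
-- ===== SOURCE B (Python) =====
-- def _truncate_fix(fix):
--     tokens = fix.split()
--     if '_eos_' in tokens:
--         tokens = tokens[:tokens.index('_eos_')]
--     return ' '.join(tokens)
-- ===== Notes on version B (the rewrite author's own statement) =====
-- stated objective: simpler
-- what changed: Replaces the accumulate-and-break loop with trailing-space bookkeeping and a final strip by a find-then-slice-then-join: split once, cut the token list before the first sentinel token via index and slice, and space-join the prefix.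
import Mathlib
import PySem

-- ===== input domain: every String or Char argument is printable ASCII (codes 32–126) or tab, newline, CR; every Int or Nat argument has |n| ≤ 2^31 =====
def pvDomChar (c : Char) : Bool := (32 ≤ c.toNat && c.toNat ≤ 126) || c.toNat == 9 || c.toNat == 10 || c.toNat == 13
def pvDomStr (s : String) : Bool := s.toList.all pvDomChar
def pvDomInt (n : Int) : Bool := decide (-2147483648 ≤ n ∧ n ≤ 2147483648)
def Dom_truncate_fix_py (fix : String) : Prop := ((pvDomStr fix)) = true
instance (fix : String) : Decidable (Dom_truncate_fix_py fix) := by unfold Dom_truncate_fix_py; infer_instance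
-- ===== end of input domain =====

-- B replaces A's accumulate-and-break loop (trailing-space bookkeeping plus a final strip)
-- by split-once, cut the token list before the first sentinel via index and slice, then space-join — objective: simpler.

-- ===== PORT A =====
-- "for token in fix.split(): if token == '_eos_': break; else: result += token + ' '"
def truncateFixLoopA : List String → String → String
  | [], result => result
  | t :: ts, result => if t == "_eos_" then result else truncateFixLoopA ts (result ++ t ++ " ")

def truncate_fix_py (fix : String) : String :=
  PySem.Str.strip (truncateFixLoopA (PySem.Str.split₀ fix) "")

-- ===== PORT B =====
-- tokens = fix.split(); if '_eos_' in tokens: tokens = tokens[:tokens.index('_eos_')]; return ' '.join(tokens)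
def truncate_fix_py_alt (fix : String) : String :=
  PySem.Str.join " "
    (if "_eos_" ∈ PySem.Str.split₀ fix then
        PySem.List.slice (PySem.Str.split₀ fix) none
          (some (((PySem.List.index? (PySem.Str.split₀ fix) "_eos_").getD 0 : Nat) : Int))
      else PySem.Str.split₀ fix)

-- ===== PRECONDITION & SPEC =====
def Spec_truncate_fix_py (fix : String) (out : String) : Prop := out = truncate_fix_py_alt fix
instance (fix : String) (out : String) : Decidable (Spec_truncate_fix_py fix out) := by unfold Spec_truncate_fix_py; infer_instance

-- ===== CLAIM (what is proved, stated in full; the proofs are below) =====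
def Claim_equal_truncate_fix_py : Prop := ∀ (fix : String), Dom_truncate_fix_py fix → Spec_truncate_fix_py fix (truncate_fix_py fix)

-- ===== LEMMAS AND PROOFS =====

-- a word is 'good' if it is nonempty and contains no whitespace (as split() guarantees)
def pvNoSp (w : List Char) : Prop := ∀ c ∈ w, PySem.Chars.isspace c = false

theorem toList_space : (" " : String).toList = [' '] := by decide

theorem toList_empty : ("" : String).toList = [] := by decide

theorem split₀_go_good : ∀ (rest cur : List Char) (acc : List (List Char)),
    (∀ w ∈ acc, w ≠ [] ∧ pvNoSp w) → pvNoSp cur →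
    ∀ w ∈ PySem.Chars.split₀.go rest cur acc, w ≠ [] ∧ pvNoSp w := by
  intro rest
  induction rest with
  | nil =>
    intro cur acc hacc hcur w hw
    simp only [PySem.Chars.split₀.go] at hw
    split at hw
    · exact hacc w (List.mem_reverse.mp hw)
    · rcases List.mem_cons.mp (List.mem_reverse.mp hw) with h | h
      · subst h
        rename_i hne
        constructor
        · intro hcon
          exact hne (by simpa [List.isEmpty_iff] using congrArg List.reverse hcon)
        · intro c hc; exact hcur c (List.mem_reverse.mp hc)
      · exact hacc w h
  | cons c rest ih =>
    intro cur acc hacc hcur w hw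
    simp only [PySem.Chars.split₀.go] at hw
    by_cases hsp : PySem.Chars.isspace c = true
    · rw [if_pos hsp] at hw
      by_cases he : cur.isEmpty = true
      · rw [if_pos he] at hw
        exact ih [] acc hacc (by intro x hx; cases hx) w hw
      · rw [if_neg he] at hw
        refine ih [] (cur.reverse :: acc) ?_ (by intro x hx; cases hx) w hw
        intro v hv
        rcases List.mem_cons.mp hv with h | h
        · subst h
          refine ⟨?_, by intro d hd; exact hcur d (List.mem_reverse.mp hd)⟩
          intro hcon
          exact he (by simpa [List.isEmpty_iff] using congrArg List.reverse hcon)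
        · exact hacc v h
    · rw [if_neg hsp] at hw
      refine ih (c :: cur) acc hacc ?_ w hw
      intro d hd
      rcases List.mem_cons.mp hd with h | h
      · subst h; simpa using hsp
      · exact hcur d h

theorem split₀_good (cs : List Char) :
    ∀ w ∈ PySem.Chars.split₀ cs, w ≠ [] ∧ pvNoSp w := by
  intro w hw
  rw [PySem.Chars.split₀] at hw
  exact split₀_go_good cs [] [] (by intro v hv; cases hv) (by intro d hd; cases hd) w hw

-- A's loop, characterised: append each pre-sentinel token followed by a space
theorem loopA_toList : ∀ (ws : List String) (r : String),
    (truncateFixLoopA ws r).toList =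
      r.toList ++ ((ws.takeWhile (fun t => !(t == "_eos_"))).map (fun t => t.toList ++ [' '])).flatten := by
  intro ws
  induction ws with
  | nil => intro r; simp [truncateFixLoopA]
  | cons t ts ih =>
    intro r
    by_cases h : t == "_eos_"
    · simp [truncateFixLoopA, h]
    · have hb : (t == "_eos_") = false := by simpa using h
      simp only [truncateFixLoopA]
      rw [if_neg (by simp [hb])]
      rw [ih]
      simp [hb, String.toList_append, toList_space]

theorem dropWhile_all_false {p : Char → Bool} : ∀ (l : List Char), (∀ c ∈ l, p c = false) →
    List.dropWhile p l = l := by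
  intro l h
  cases l with
  | nil => rfl
  | cons c t => simp [h c (by simp)]

theorem rstrip_append_space (x : List Char) :
    PySem.Chars.rstrip (x ++ [' ']) = PySem.Chars.rstrip x := by
  have hsp : PySem.Chars.isspace ' ' = true := by decide
  simp [PySem.Chars.rstrip, hsp]

theorem rstrip_noSp (x : List Char) (h : pvNoSp x) : PySem.Chars.rstrip x = x := by
  simp only [PySem.Chars.rstrip]
  rw [dropWhile_all_false _ (by intro c hc; exact h c (List.mem_reverse.mp hc))]
  simp

theorem rstrip_append (a b : List Char) (h : PySem.Chars.rstrip b ≠ []) :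
    PySem.Chars.rstrip (a ++ b) = a ++ PySem.Chars.rstrip b := by
  have hb : List.dropWhile PySem.Chars.isspace b.reverse ≠ [] := by
    intro hcon
    apply h
    simp [PySem.Chars.rstrip, hcon]
  simp only [PySem.Chars.rstrip, List.reverse_append, List.dropWhile_append]
  rw [if_neg (by simpa [List.isEmpty_iff] using hb)]
  simp

theorem rstrip_join : ∀ (ps : List (List Char)), (∀ w ∈ ps, w ≠ [] ∧ pvNoSp w) →
    PySem.Chars.rstrip (PySem.Chars.join [' '] ps) = PySem.Chars.join [' '] ps ∧
    (ps ≠ [] → PySem.Chars.join [' '] ps ≠ []) := by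
  intro ps
  induction ps with
  | nil => intro _; exact ⟨by simp [PySem.Chars.join_nil, PySem.Chars.rstrip], by simp⟩
  | cons w ps ih =>
    intro h
    have hw := h w (by simp)
    cases ps with
    | nil =>
      rw [PySem.Chars.join_singleton]
      exact ⟨rstrip_noSp w hw.2, fun _ => hw.1⟩
    | cons v ps' =>
      have ih' := ih (by intro u hu; exact h u (by simp [hu]))
      rw [PySem.Chars.join_cons_cons]
      have hrs : PySem.Chars.rstrip (PySem.Chars.join [' '] (v :: ps')) ≠ [] := by
        rw [ih'.1]; exact ih'.2 (by simp)
      have h1 : PySem.Chars.rstrip ([' '] ++ PySem.Chars.join [' '] (v :: ps')) =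
          [' '] ++ PySem.Chars.rstrip (PySem.Chars.join [' '] (v :: ps')) := rstrip_append _ _ hrs
      have h2 : PySem.Chars.rstrip ([' '] ++ PySem.Chars.join [' '] (v :: ps')) ≠ [] := by
        rw [h1]; simp
      constructor
      · calc PySem.Chars.rstrip (w ++ [' '] ++ PySem.Chars.join [' '] (v :: ps'))
            = PySem.Chars.rstrip (w ++ ([' '] ++ PySem.Chars.join [' '] (v :: ps'))) := by
              rw [List.append_assoc]
          _ = w ++ PySem.Chars.rstrip ([' '] ++ PySem.Chars.join [' '] (v :: ps')) :=
              rstrip_append _ _ h2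
          _ = w ++ ([' '] ++ PySem.Chars.rstrip (PySem.Chars.join [' '] (v :: ps'))) := by rw [h1]
          _ = w ++ [' '] ++ PySem.Chars.join [' '] (v :: ps') := by
              rw [ih'.1, List.append_assoc]
      · intro _
        simp [hw.1]

theorem flatten_eq_join : ∀ (ps : List (List Char)), ps ≠ [] →
    ((ps.map (fun w => w ++ [' '])).flatten) = PySem.Chars.join [' '] ps ++ [' '] := by
  intro ps
  induction ps with
  | nil => intro h; exact absurd rfl h
  | cons w ps ih =>
    intro _
    cases ps with
    | nil => simp [PySem.Chars.join_singleton]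
    | cons v ps' =>
      rw [List.map_cons, List.flatten_cons, ih (by simp), PySem.Chars.join_cons_cons]
      simp

theorem strip_flat (ps : List (List Char)) (h : ∀ w ∈ ps, w ≠ [] ∧ pvNoSp w) :
    PySem.Chars.strip ((ps.map (fun w => w ++ [' '])).flatten) = PySem.Chars.join [' '] ps := by
  cases ps with
  | nil => simp [PySem.Chars.strip, PySem.Chars.lstrip, PySem.Chars.rstrip, PySem.Chars.join_nil]
  | cons w ps' =>
    have hw := h w (by simp)
    obtain ⟨c, t, hct⟩ : ∃ c t, w = c :: t := by
      cases w with
      | nil => exact absurd rfl hw.1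
      | cons c t => exact ⟨c, t, rfl⟩
    have hl : PySem.Chars.lstrip (((w :: ps').map (fun w => w ++ [' '])).flatten) =
        ((w :: ps').map (fun w => w ++ [' '])).flatten := by
      simp only [List.map_cons, List.flatten_cons, hct, List.cons_append]
      simp [PySem.Chars.lstrip, hw.2 c (by simp [hct])]
    rw [PySem.Chars.strip, hl, flatten_eq_join (w :: ps') (by simp), rstrip_append_space]
    exact (rstrip_join (w :: ps') h).1

theorem takeWhile_append_of_all {α : Type} (p : α → Bool) : ∀ (pre l : List α),
    (∀ a ∈ pre, p a = true) → List.takeWhile p (pre ++ l) = pre ++ List.takeWhile p l := by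
  intro pre
  induction pre with
  | nil => intro l _; simp
  | cons a t ih =>
    intro l h
    simp [h a (by simp), ih l (by intro b hb; exact h b (by simp [hb]))]

theorem takeWhile_all {α : Type} (p : α → Bool) (l : List α)
    (h : ∀ a ∈ l, p a = true) : List.takeWhile p l = l := by
  simpa using takeWhile_append_of_all p l [] h

-- B's cut equals takeWhile before the sentinel
theorem cut_eq_takeWhile (tokens : List String) :
    (if "_eos_" ∈ tokens then
        PySem.List.slice tokens none (some (((PySem.List.index? tokens "_eos_").getD 0 : Nat) : Int))
      else tokens) = tokens.takeWhile (fun t => !(t == "_eos_")) := by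
  by_cases hm : "_eos_" ∈ tokens
  · rw [if_pos hm]
    have hs : (PySem.List.index? tokens "_eos_").isSome := (PySem.List.index?_isSome_iff tokens "_eos_").2 hm
    obtain ⟨k, hk⟩ := Option.isSome_iff_exists.mp hs
    obtain ⟨pre, suf, hsplit, hlen, hnotin⟩ := (PySem.List.index?_eq_some_iff tokens "_eos_" k).1 hk
    rw [hk]
    simp only [Option.getD_some]
    rw [PySem.List.slice_to_natCast, hsplit, ← hlen, List.take_left]
    rw [takeWhile_append_of_all _ pre _ (by
      intro a ha
      have hne : a ≠ "_eos_" := fun hc => hnotin (hc ▸ ha)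
      simp [hne])]
    simp
  · rw [if_neg hm, takeWhile_all _ tokens (by
      intro a ha
      have hne : a ≠ "_eos_" := fun hc => hm (hc ▸ ha)
      simp [hne])]

-- ===== VERDICT (by name: the statement is the Claim_ definition above) =====
theorem truncate_fix_py_spec : Claim_equal_truncate_fix_py := by
  intro fix _
  unfold Spec_truncate_fix_py truncate_fix_py truncate_fix_py_alt
  rw [cut_eq_takeWhile]
  apply String.toList_inj.mp
  rw [PySem.Str.toList_strip, loopA_toList, PySem.Str.toList_join, toList_space, toList_empty,
    List.nil_append]
  have hgood : ∀ w ∈ ((PySem.Str.split₀ fix).takeWhile (fun t => !(t == "_eos_"))).map String.toList,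
      w ≠ [] ∧ pvNoSp w := by
    intro w hw
    obtain ⟨t, ht, rfl⟩ := List.mem_map.mp hw
    have ht' : t ∈ PySem.Str.split₀ fix := (List.takeWhile_sublist _).subset ht
    have hmem : t.toList ∈ PySem.Chars.split₀ fix.toList := by
      rw [← PySem.Str.split₀_map_toList]
      exact List.mem_map_of_mem ht'
    exact split₀_good fix.toList _ hmem
  have hmap : ((PySem.Str.split₀ fix).takeWhile (fun t => !(t == "_eos_"))).map (fun t => t.toList ++ [' ']) =
      (((PySem.Str.split₀ fix).takeWhile (fun t => !(t == "_eos_"))).map String.toList).map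
        (fun w => w ++ [' ']) := by
    simp [List.map_map, Function.comp]
  rw [hmap]
  exact strip_flat _ hgood
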